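-- pv_equiv track=rewrite | github.com/48ca/cs | ai/graph/bad/graph_less3.py | numberOfEdges
-- ===== SOURCE A (Python) =====
-- def numberOfEdges(w_dict):
--     visited = set()
--     edges = 0
--     for key in w_dict:
--         visited.add(key)
--         for word in w_dict[key]:
--             if word not in visited:
--                 edges += 1
--     return edges
-- ===== SOURCE B (Python) =====
-- def numberOfEdges(w_dict):
--     # Complement counting: total adjacency entries minus the non-edges
--     # (occurrences of a key inside its own or any later key's list),
--     # found with a suffix counter built walking the items in reverse.
--     total = sum(len(ws) for ws in w_dict.values())
--     cnt = {}
--     non = 0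
--     for k, ws in reversed(list(w_dict.items())):
--         for w in ws:
--             cnt[w] = cnt.get(w, 0) + 1
--         non += cnt.get(k, 0)
--     return total - non
-- ===== Notes on version B (the rewrite author's own statement) =====
-- stated objective: alternative
-- what changed: B counts the complement: it takes the total number of adjacency entries and subtracts the non-edges, found by walking the items in REVERSE while building a suffix occurrence counter (dict of counts), instead of A's forward pass that tests each word against a growing visited set.
import Mathlib
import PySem

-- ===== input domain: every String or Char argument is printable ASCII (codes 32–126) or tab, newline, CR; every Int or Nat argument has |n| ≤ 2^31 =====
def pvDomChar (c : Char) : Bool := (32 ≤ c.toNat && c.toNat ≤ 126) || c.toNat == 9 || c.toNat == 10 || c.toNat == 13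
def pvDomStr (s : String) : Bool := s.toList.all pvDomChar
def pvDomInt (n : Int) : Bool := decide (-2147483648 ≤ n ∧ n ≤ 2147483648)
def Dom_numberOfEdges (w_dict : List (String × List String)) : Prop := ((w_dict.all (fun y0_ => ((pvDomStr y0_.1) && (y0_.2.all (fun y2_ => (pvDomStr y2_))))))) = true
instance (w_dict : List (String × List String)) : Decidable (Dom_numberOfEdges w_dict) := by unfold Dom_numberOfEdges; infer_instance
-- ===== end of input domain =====

-- B counts the complement: total adjacency entries minus the non-edges, found by a
-- REVERSE pass building a suffix occurrence counter, instead of A's forward pass with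
-- a growing visited set; objective: alternative (same asymptotic cost).

-- ===== PORT A =====
def numberOfEdges (w_dict : List (String × List String)) : Int :=
  (w_dict.foldl
    (fun (st : PySem.Set String × Int) kv =>
      let visited := PySem.Set.add st.1 kv.1
      (visited,
        kv.2.foldl (fun e w => if PySem.Set.contains visited w then e else e + 1) st.2))
    (PySem.Set.empty, 0)).2

-- ===== PORT B =====
def numberOfEdges_alt (w_dict : List (String × List String)) : Int :=
  ((w_dict.map Prod.snd).foldl (fun s ws => s + (ws.length : Int)) 0)
  - (w_dict.reverse.foldl
      (fun (st : PySem.Dict String Int × Int) kv =>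
        let cnt := kv.2.foldl (fun d w => d.insert w (d.getD w 0 + 1)) st.1
        (cnt, st.2 + cnt.getD kv.1 0))
      (PySem.Dict.empty, 0)).2

-- ===== PRECONDITION & SPEC =====
-- Pre_ excludes association lists with duplicate keys: the argument models a Python
-- dict, whose keys are unique, so such lists represent no Python input.
def Pre_numberOfEdges (w_dict : List (String × List String)) : Prop :=
  (w_dict.map Prod.fst).Nodup
instance (w_dict : List (String × List String)) : Decidable (Pre_numberOfEdges w_dict) := by
  unfold Pre_numberOfEdges; infer_instance
def pvWitness_numberOfEdges : (List (String × List String)) :=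
  [("a", ["b", "c", "a"]), ("b", ["a"]), ("c", [])]
def Spec_numberOfEdges (w_dict : List (String × List String)) (out : Int) : Prop := out = numberOfEdges_alt w_dict
instance (w_dict : List (String × List String)) (out : Int) : Decidable (Spec_numberOfEdges w_dict out) := by unfold Spec_numberOfEdges; infer_instance

-- ===== CLAIM (what is proved, stated in full; the proofs are below) =====
def Claim_equal_numberOfEdges : Prop := ∀ (w_dict : List (String × List String)), Dom_numberOfEdges w_dict → Pre_numberOfEdges w_dict → Spec_numberOfEdges w_dict (numberOfEdges w_dict)

-- ===== LEMMAS AND PROOFS =====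

/-- Edge count of A, as a recursion over the remaining list given the seen keys. -/
def pvCnt : List String → List (String × List String) → Int
  | _, [] => 0
  | seen, kv :: rest =>
      ((kv.2.countP (fun w => !decide (w ∈ kv.1 :: seen)) : Nat) : Int) + pvCnt (kv.1 :: seen) rest

/-- The complement of pvCnt: words landing inside the seen/prefix keys. -/
def pvMiss : List String → List (String × List String) → Int
  | _, [] => 0
  | seen, kv :: rest =>
      ((kv.2.countP (fun w => decide (w ∈ kv.1 :: seen)) : Nat) : Int) + pvMiss (kv.1 :: seen) rest

/-- Non-edges: occurrences of each key inside its own or any later key's list. -/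
def pvNonRef : List (String × List String) → Int
  | [] => 0
  | kv :: rest =>
      (((kv.2 ++ rest.flatMap Prod.snd).count kv.1 : Nat) : Int) + pvNonRef rest

lemma pvFoldCountNot (p : String → Bool) :
    ∀ (ws : List String) (e : Int),
      ws.foldl (fun e w => if p w then e else e + 1) e
        = e + ((ws.countP (fun w => !p w) : Nat) : Int) := by
  intro ws
  induction ws with
  | nil => intro e; simp
  | cons w ws ih =>
      intro e
      simp only [List.foldl_cons, List.countP_cons, ih]
      cases h : p w
      · simp
        ring
      · simp

lemma pvCountP_split (p : String → Bool) :
    ∀ ws : List String, ws.countP (fun w => !p w) + ws.countP p = ws.length := by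
  intro ws
  induction ws with
  | nil => simp
  | cons w ws ih =>
      cases h : p w <;> simp [h] <;> omega

lemma pvAFold :
    ∀ (l : List (String × List String)) (S : PySem.Set String) (e : Int) (seen : List String),
      (∀ w, PySem.Set.contains S w = decide (w ∈ seen)) →
      (l.foldl
        (fun (st : PySem.Set String × Int) kv =>
          let visited := PySem.Set.add st.1 kv.1
          (visited,
            kv.2.foldl (fun e w => if PySem.Set.contains visited w then e else e + 1) st.2))
        (S, e)).2
      = e + pvCnt seen l := by
  intro l
  induction l with
  | nil => intro S e seen _; simp [pvCnt]
  | cons kv rest ih =>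
      intro S e seen hS
      have hmemS : ∀ w, w ∈ S ↔ w ∈ seen := by
        intro w
        rw [← PySem.Set.contains_iff, hS w]
        simp
      have hS' : ∀ w, PySem.Set.contains (PySem.Set.add S kv.1) w = decide (w ∈ kv.1 :: seen) := by
        intro w
        have hiff : (w ∈ PySem.Set.add S kv.1) ↔ (w ∈ kv.1 :: seen) := by
          rw [PySem.Set.mem_add, List.mem_cons, hmemS w]
          tauto
        by_cases h : w ∈ kv.1 :: seen
        · simpa [h] using (PySem.Set.contains_iff _ _).mpr (hiff.mpr h)
        · have hnc : ¬ w ∈ PySem.Set.add S kv.1 := fun hc => h (hiff.mp hc)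
          have hfalse : PySem.Set.contains (PySem.Set.add S kv.1) w = false := by
            rw [← Bool.not_eq_true]
            intro hc
            exact hnc ((PySem.Set.contains_iff _ _).mp hc)
          rw [hfalse]
          simp [h]
      simp only [List.foldl_cons]
      rw [ih _ _ _ hS']
      rw [pvFoldCountNot (fun w => PySem.Set.contains (PySem.Set.add S kv.1) w)]
      have heq : (fun w => !PySem.Set.contains (PySem.Set.add S kv.1) w)
          = (fun w => !decide (w ∈ kv.1 :: seen)) := by
        funext w; rw [hS' w]
      rw [heq]
      simp [pvCnt]
      ring

lemma pvCnt_add_miss :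
    ∀ (l : List (String × List String)) (seen : List String),
      pvCnt seen l + pvMiss seen l = ((l.flatMap Prod.snd).length : Int) := by
  intro l
  induction l with
  | nil => intro seen; simp [pvCnt, pvMiss]
  | cons kv rest ih =>
      intro seen
      have hsplit := pvCountP_split (fun w => decide (w ∈ kv.1 :: seen)) kv.2
      simp only [pvCnt, pvMiss, List.flatMap_cons, List.length_append]
      have := ih (kv.1 :: seen)
      push_cast [← hsplit] at *
      linarith

/-- countP over a cons'd membership list splits into a count plus countP, when the new
element is not already in the list. -/
lemma pvCountP_cons_mem (k : String) (seen : List String) (hk : k ∉ seen) :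
    ∀ ws : List String,
      ws.countP (fun w => decide (w ∈ k :: seen))
        = ws.count k + ws.countP (fun w => decide (w ∈ seen)) := by
  intro ws
  induction ws with
  | nil => simp
  | cons w ws ihw =>
      simp only [List.countP_cons, List.count_cons, ihw]
      by_cases h1 : w = k
      · subst h1
        simp [hk]
        omega
      · by_cases h2 : w ∈ seen
        · simp [h1, h2]
          omega
        · simp [h1, h2]

lemma pvMiss_eq_nonRef :
    ∀ (l : List (String × List String)) (seen : List String),
      (l.map Prod.fst).Nodup →
      (∀ k ∈ l.map Prod.fst, k ∉ seen) →
      pvMiss seen l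
        = pvNonRef l + (((l.flatMap Prod.snd).countP (fun w => decide (w ∈ seen)) : Nat) : Int) := by
  intro l
  induction l with
  | nil => intro seen _ _; simp [pvMiss, pvNonRef]
  | cons kv rest ih =>
      intro seen hnd hdisj
      rw [List.map_cons, List.nodup_cons] at hnd
      obtain ⟨hk, hnd'⟩ := hnd
      have hkseen : kv.1 ∉ seen := hdisj kv.1 (by simp)
      have hdisj' : ∀ k ∈ rest.map Prod.fst, k ∉ kv.1 :: seen := by
        intro k hkr
        simp only [List.mem_cons, not_or]
        exact ⟨fun h => hk (h ▸ hkr), hdisj k (by simp [hkr])⟩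
      simp only [pvMiss, pvNonRef, List.flatMap_cons]
      rw [ih (kv.1 :: seen) hnd' hdisj']
      rw [pvCountP_cons_mem kv.1 seen hkseen kv.2]
      rw [pvCountP_cons_mem kv.1 seen hkseen (rest.flatMap Prod.snd)]
      simp only [List.count_append, List.countP_append]
      push_cast
      ring

/-- B's reverse fold, in foldr form: the running subtrahend accumulates pvNonRef and
the counter's values are the suffix word counts (the initial counter must be empty). -/
lemma pvBFold :
    ∀ (l : List (String × List String)) (non : Int),
      (l.foldr
        (fun kv (st : PySem.Dict String Int × Int) =>
          let cnt := kv.2.foldl (fun d w => d.insert w (d.getD w 0 + 1)) st.1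
          (cnt, st.2 + cnt.getD kv.1 0))
        (PySem.Dict.empty, non)).2 = non + pvNonRef l
      ∧ ∀ w, (l.foldr
        (fun kv (st : PySem.Dict String Int × Int) =>
          let cnt := kv.2.foldl (fun d w => d.insert w (d.getD w 0 + 1)) st.1
          (cnt, st.2 + cnt.getD kv.1 0))
        (PySem.Dict.empty, non)).1.getD w 0 = (((l.flatMap Prod.snd).count w : Nat) : Int) := by
  intro l
  induction l with
  | nil =>
      intro non
      refine ⟨by simp [pvNonRef], ?_⟩
      intro w
      simp [PySem.Dict.getD_empty]
  | cons kv rest ih =>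
      intro non
      obtain ⟨ih2, ih1⟩ := ih non
      constructor
      · simp only [List.foldr_cons, pvNonRef, ih2]
        rw [PySem.Dict.getD_foldl_insert_add_one, ih1 kv.1]
        simp only [List.count_append]
        push_cast
        ring
      · intro w
        simp only [List.foldr_cons, List.flatMap_cons]
        rw [PySem.Dict.getD_foldl_insert_add_one, ih1 w]
        simp only [List.count_append]
        push_cast
        ring

/-- Sum of the list lengths is the length of the flattened list. -/
lemma pvTotalLen :
    ∀ (l : List (String × List String)) (s : Int),
      (l.map Prod.snd).foldl (fun s ws => s + (ws.length : Int)) s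
        = s + ((l.flatMap Prod.snd).length : Int) := by
  intro l
  induction l with
  | nil => intro s; simp
  | cons kv rest ih =>
      intro s
      simp only [List.map_cons, List.foldl_cons, List.flatMap_cons, List.length_append, ih]
      push_cast
      ring

-- ===== VERDICT (by name: the statement is the Claim_ definition above) =====
theorem numberOfEdges_spec : Claim_equal_numberOfEdges := by
  intro l _ hpre
  unfold Spec_numberOfEdges
  show numberOfEdges l = numberOfEdges_alt l
  unfold numberOfEdges numberOfEdges_alt
  rw [pvAFold l PySem.Set.empty 0 []
      (by intro w; simp [PySem.Set.empty, PySem.Set.contains])]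
  rw [List.foldl_reverse, pvTotalLen l 0]
  rw [(pvBFold l 0).1]
  have h1 := pvCnt_add_miss l []
  have h2 := pvMiss_eq_nonRef l [] hpre (by intro k _ h; simp at h)
  simp at h2
  omega
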